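-- pv_equiv track=rewrite | github.com/houking-can/RDANER | utils.py | strip_list
-- ===== SOURCE A (Python) =====
-- def strip_list(docs, chars=['', '\n', []]):
--     start = 0
--     for i in range(len(docs)):
--         if docs[i] not in chars:
--             break
--         start += 1
--     end = len(docs)
--     for i in range(len(docs) - 1, -1, -1):
--         if docs[i] not in chars:
--             break
--         end -= 1
--     docs = docs[start:end]
--     return docs
-- ===== SOURCE B (Python) =====
-- def strip_list(docs, chars=['', '\n', []]):
--     # Single forward pass: emit kept elements; strippable elements seen after
--     # the first kept one wait in `pending` and are flushed only when another
--     # kept element follows, so trailing strippables are never emitted.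
--     try:
--         strippable = frozenset(chars)   # O(1) membership test
--     except TypeError:
--         strippable = chars  # unhashable entry (e.g. the default's []): test sequentially
--     out = []
--     pending = []
--     for d in docs:
--         if d in strippable:
--             if out:
--                 pending.append(d)
--         else:
--             out.extend(pending)
--             out.append(d)
--             pending = []
--     return out
-- ===== Notes on version B (the rewrite author's own statement) =====
-- stated objective: alternative
-- what changed: Replaces A's two early-stopping boundary index scans plus a slice with a single forward pass that appends kept elements to an output list, buffering interior strippable elements in a pending list that is flushed only when a later kept element appears.
import Mathlib
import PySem

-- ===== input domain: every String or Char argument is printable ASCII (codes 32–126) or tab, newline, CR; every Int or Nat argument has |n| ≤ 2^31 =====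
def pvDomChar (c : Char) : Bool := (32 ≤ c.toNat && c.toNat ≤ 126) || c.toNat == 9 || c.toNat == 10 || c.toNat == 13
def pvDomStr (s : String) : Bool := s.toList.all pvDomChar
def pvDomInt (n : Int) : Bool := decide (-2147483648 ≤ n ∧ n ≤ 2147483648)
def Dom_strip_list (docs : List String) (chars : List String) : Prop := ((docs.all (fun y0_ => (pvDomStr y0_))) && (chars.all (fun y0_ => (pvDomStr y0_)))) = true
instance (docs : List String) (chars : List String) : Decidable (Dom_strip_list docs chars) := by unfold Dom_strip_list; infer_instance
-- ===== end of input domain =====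

-- B replaces A's two early-stopping boundary scans + slice with one forward pass
-- using an output list and a pending buffer (objective: alternative, same cost).

-- Python's `d in chars` (list membership by ==)
def memB (chars : List String) (d : String) : Bool := chars.contains d

-- ===== PORT A =====
-- the forward for-loop with break: counts leading elements that are in chars
def pyPrefixLen (chars : List String) : List String → Nat
  | [] => 0
  | d :: rest => if memB chars d then pyPrefixLen chars rest + 1 else 0

def strip_list (docs : List String) (chars : List String) : List String :=
  let start := pyPrefixLen chars docs
  -- the backward for-loop with break: end = len - count of trailing elements in chars
  let stop := docs.length - pyPrefixLen chars docs.reverse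
  PySem.List.slice docs (some (start : Int)) (some (stop : Int))

-- ===== PORT B =====
-- Source B's `d in strippable` where strippable = frozenset(chars); on List String every
-- element is hashable, so Source B always takes the frozenset path (the except branch is
-- only for unhashable elements, which the String type excludes)
def memBSet (chars : List String) (d : String) : Bool :=
  PySem.Set.contains (PySem.Set.ofList chars) d

-- the single for-loop of Source B over (out, pending)
def altLoop (chars : List String) (out pending : List String) : List String → List String
  | [] => out
  | d :: rest =>
    if memBSet chars d then
      altLoop chars out (if out.isEmpty then pending else pending ++ [d]) rest
    else
      altLoop chars (out ++ pending ++ [d]) [] rest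

def strip_list_alt (docs : List String) (chars : List String) : List String :=
  altLoop chars [] [] docs

-- ===== PRECONDITION & SPEC =====
def Spec_strip_list (docs : List String) (chars : List String) (out : List String) : Prop := out = strip_list_alt docs chars
instance (docs : List String) (chars : List String) (out : List String) : Decidable (Spec_strip_list docs chars out) := by unfold Spec_strip_list; infer_instance

-- ===== CLAIM (what is proved, stated in full; the proofs are below) =====
def Claim_equal_strip_list : Prop := ∀ (docs : List String) (chars : List String), Dom_strip_list docs chars → Spec_strip_list docs chars (strip_list docs chars)

-- ===== LEMMAS AND PROOFS =====

-- canonical form both ports are reduced to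
def rstripL (p : String → Bool) (l : List String) : List String :=
  (l.reverse.dropWhile p).reverse

def trimL (p : String → Bool) (l : List String) : List String :=
  rstripL p (l.dropWhile p)

lemma pyPrefixLen_eq (chars : List String) (l : List String) :
    pyPrefixLen chars l = (l.takeWhile (memB chars)).length := by
  induction l with
  | nil => rfl
  | cons d rest ih =>
      by_cases h : memB chars d <;>
        simp [pyPrefixLen, h, ih]

lemma drop_takeWhile_length (p : String → Bool) (l : List String) :
    l.drop (l.takeWhile p).length = l.dropWhile p := by
  induction l with
  | nil => rfl
  | cons d rest ih => by_cases h : p d <;> simp [h, ih]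

lemma takeWhile_append_of_exists (p : String → Bool) (u v : List String)
    (h : ∃ x ∈ u, p x = false) : (u ++ v).takeWhile p = u.takeWhile p := by
  induction u with
  | nil => simp at h
  | cons d rest ih =>
      by_cases hd : p d
      · obtain ⟨x, hx, hpx⟩ := h
        rcases List.mem_cons.mp hx with hx | hx
        · subst hx; simp [hd] at hpx
        · simp [hd, ih ⟨x, hx, hpx⟩]
      · simp [hd]

lemma dropWhile_append_of_exists (p : String → Bool) (u v : List String)
    (h : ∃ x ∈ u, p x = false) : (u ++ v).dropWhile p = u.dropWhile p ++ v := by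
  induction u with
  | nil => simp at h
  | cons d rest ih =>
      by_cases hd : p d
      · obtain ⟨x, hx, hpx⟩ := h
        rcases List.mem_cons.mp hx with hx | hx
        · subst hx; simp [hd] at hpx
        · simp [hd, ih ⟨x, hx, hpx⟩]
      · simp [hd]

lemma head_dropWhile_false (p : String → Bool) (l : List String) (d : String)
    (rest : List String) (h : l.dropWhile p = d :: rest) : p d = false := by
  induction l with
  | nil => simp at h
  | cons a t ih =>
      by_cases ha : p a
      · exact ih (by simpa [List.dropWhile_cons, ha] using h)
      · rw [List.dropWhile_cons, if_neg (by simp [ha])] at h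
        injection h with h1 _; subst h1; simpa using ha

-- A's slice equals the canonical trim
lemma take_sub_eq_rstrip (p : String → Bool) (y : List String) :
    y.take (y.length - (y.reverse.takeWhile p).length) = rstripL p y := by
  rw [rstripL, ← drop_takeWhile_length p y.reverse, List.drop_reverse,
    List.reverse_reverse]

lemma stripA_eq_trim (docs chars : List String) :
    strip_list docs chars = trimL (memB chars) docs := by
  have hs : pyPrefixLen chars docs = (docs.takeWhile (memB chars)).length :=
    pyPrefixLen_eq chars docs
  have ht : pyPrefixLen chars docs.reverse = (docs.reverse.takeWhile (memB chars)).length :=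
    pyPrefixLen_eq chars docs.reverse
  rw [strip_list, hs, ht, PySem.List.slice_natCast,
    drop_takeWhile_length (memB chars) docs]
  rcases hy : docs.dropWhile (memB chars) with _ | ⟨d, ys⟩
  · -- everything stripped from the front: slice is empty, trim is empty
    rw [trimL, hy]
    simp [rstripL]
  · -- the head of the remainder fails the test, so the trailing scan stays inside it
    have hd : memB chars d = false := head_dropWhile_false (memB chars) docs d ys hy
    have hsplit : docs.takeWhile (memB chars) ++ docs.dropWhile (memB chars) = docs :=
      List.takeWhile_append_dropWhile
    have hrev : docs.reverse =
        (docs.dropWhile (memB chars)).reverse ++ (docs.takeWhile (memB chars)).reverse := by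
      conv_lhs => rw [← hsplit]
      simp
    have hex : ∃ x ∈ (docs.dropWhile (memB chars)).reverse, memB chars x = false :=
      ⟨d, by simp [hy], hd⟩
    have htw : docs.reverse.takeWhile (memB chars) =
        (docs.dropWhile (memB chars)).reverse.takeWhile (memB chars) := by
      rw [hrev, takeWhile_append_of_exists _ _ _ hex]
    have hlen : docs.length =
        (docs.takeWhile (memB chars)).length + (docs.dropWhile (memB chars)).length := by
      conv_lhs => rw [← hsplit]
      rw [List.length_append]
    rw [htw, hlen, trimL]
    have harith : (docs.takeWhile (memB chars)).length + (docs.dropWhile (memB chars)).length -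
        ((docs.dropWhile (memB chars)).reverse.takeWhile (memB chars)).length -
        (docs.takeWhile (memB chars)).length =
        (docs.dropWhile (memB chars)).length -
        ((docs.dropWhile (memB chars)).reverse.takeWhile (memB chars)).length := by
      have : ((docs.dropWhile (memB chars)).reverse.takeWhile (memB chars)).length ≤
          (docs.dropWhile (memB chars)).length := by
        simpa using (List.takeWhile_prefix (l := (docs.dropWhile (memB chars)).reverse)
          (p := memB chars)).length_le
      omega
    rw [harith, hy]
    exact take_sub_eq_rstrip _ _

lemma rstripL_cons (p : String → Bool) (d : String) (l : List String) :
    rstripL p (d :: l) =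
      if l.any (fun x => !p x) then d :: rstripL p l
      else if p d then [] else [d] := by
  by_cases h : l.any (fun x => !p x)
  · have hex : ∃ x ∈ l.reverse, p x = false := by
      obtain ⟨x, hx, hpx⟩ := List.any_eq_true.mp h
      exact ⟨x, List.mem_reverse.mpr hx, by simpa using hpx⟩
    simp only [rstripL, List.reverse_cons, h, if_true,
      dropWhile_append_of_exists p _ _ hex]
    simp
  · have hall : ∀ x ∈ l.reverse, p x = true := by
      intro x hx
      by_contra hc
      exact h (List.any_eq_true.mpr ⟨x, List.mem_reverse.mp hx, by simpa using hc⟩)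
    have hnil : l.reverse.dropWhile p = [] := List.dropWhile_eq_nil_iff.mpr hall
    simp only [rstripL, List.reverse_cons, h]
    rw [if_neg (by simp), List.dropWhile_append, hnil]
    by_cases hd : p d <;> simp [hd]

-- the main-phase invariant of B's loop (out already nonempty)
lemma altLoop_inv (chars : List String) (l : List String) :
    ∀ out pending : List String, out ≠ [] →
      altLoop chars out pending l =
        out ++ (if l.any (fun x => !memBSet chars x) then
                  pending ++ rstripL (memBSet chars) l else []) := by
  induction l with
  | nil => intro out pending _; simp [altLoop]
  | cons d rest ih =>
      intro out pending hout
      have hne : ¬ (out.isEmpty = true) := by simpa using hout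
      by_cases hd : memBSet chars d
      · rw [altLoop, if_pos hd, if_neg hne,
          ih out (pending ++ [d]) hout, rstripL_cons]
        by_cases hr : rest.any (fun x => !memBSet chars x) <;> simp [hd, hr]
      · rw [altLoop, if_neg hd,
          ih (out ++ pending ++ [d]) [] (by simp), rstripL_cons]
        by_cases hr : rest.any (fun x => !memBSet chars x) <;> simp [hd, hr]

-- B skips the leading strippable elements without touching state
lemma altLoop_leading (chars : List String) (docs : List String) :
    altLoop chars [] [] docs =
      altLoop chars [] [] (docs.dropWhile (memBSet chars)) := by
  induction docs with
  | nil => rfl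
  | cons d rest ih =>
      by_cases hd : memBSet chars d
      · rw [altLoop, if_pos hd, List.dropWhile_cons, if_pos hd]
        simpa using ih
      · rw [List.dropWhile_cons, if_neg hd]

lemma memBSet_eq_memB (chars : List String) : memBSet chars = memB chars := by
  funext d
  simp [memBSet, memB, PySem.Set.contains, PySem.Set.mem_ofList]

lemma stripB_eq_trim (docs chars : List String) :
    strip_list_alt docs chars = trimL (memB chars) docs := by
  rw [← memBSet_eq_memB, strip_list_alt, altLoop_leading, trimL]
  rcases hy : docs.dropWhile (memBSet chars) with _ | ⟨d, ys⟩
  · simp [altLoop, rstripL]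
  · have hd : memBSet chars d = false := head_dropWhile_false (memBSet chars) docs d ys hy
    rw [altLoop, if_neg (by simp [hd]),
      altLoop_inv chars ys ([] ++ [] ++ [d]) [] (by simp), rstripL_cons]
    by_cases hr : ys.any (fun x => !memBSet chars x) <;> simp [hr, hd]

-- ===== VERDICT (by name: the statement is the Claim_ definition above) =====
theorem strip_list_spec : Claim_equal_strip_list := by
  intro docs chars _
  show strip_list docs chars = strip_list_alt docs chars
  rw [stripA_eq_trim, stripB_eq_trim]
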